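-- pv_equiv track=rewrite | github.com/szeider/powersum | adf_verifier.py | compute_union_size
-- ===== SOURCE A (Python) =====
-- def compute_union_size(sets):
--     """Compute |2^S1 ∪ 2^S2 ∪ ... ∪ 2^Sk| using inclusion-exclusion."""
--     k = len(sets)
--     if k == 0:
--         return 0
--
--     # Compute all intersection sizes
--     masks = list(range(1, 2**k))
--     intersection_sizes = {}
--
--     for mask in masks:
--         # Find intersection of sets indicated by mask
--         intersection = None
--         for i in range(k):
--             if mask & (1 << i):
--                 if intersection is None:
--                     intersection = sets[i].copy()
--                 else:
--                     intersection = intersection & sets[i]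
--         intersection_sizes[mask] = len(intersection) if intersection else 0
--
--     # Apply inclusion-exclusion principle
--     result = 0
--     for mask in masks:
--         bits = bin(mask).count('1')
--         sign = 1 if bits % 2 == 1 else -1
--         result += sign * (1 << intersection_sizes[mask])
--
--     return result
-- ===== SOURCE B (Python) =====
-- def compute_union_size(sets):
--     """Compute |2^S1 u 2^S2 u ... u 2^Sk|: give each element of the union its
--     set-membership bitmask, read every intersection size off the bitmask list,
--     then apply the same inclusion-exclusion sum."""
--     k = len(sets)
--     if k == 0:
--         return 0
--     univ = set(x for s in sets for x in s)
--     bms = []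
--     for x in univ:
--         m = 0
--         for i, s in enumerate(sets):
--             if x in s:
--                 m |= 1 << i
--         bms.append(m)
--     result = 0
--     for mask in range(1, 1 << k):
--         size = 0
--         for m in bms:
--             if m & mask == mask:
--                 size += 1
--         bits = bin(mask).count('1')
--         term = 1 << size
--         result += term if bits % 2 == 1 else -term
--     return result
-- ===== Notes on version B (the rewrite author's own statement) =====
-- stated objective: alternative
-- what changed: Instead of recomputing a chain of set intersections for every one of the 2^k-1 masks, B makes one pass over the union giving each element its k-bit membership bitmask and reads each intersection size off that bitmask list, before the same inclusion-exclusion sum.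
import Mathlib
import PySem

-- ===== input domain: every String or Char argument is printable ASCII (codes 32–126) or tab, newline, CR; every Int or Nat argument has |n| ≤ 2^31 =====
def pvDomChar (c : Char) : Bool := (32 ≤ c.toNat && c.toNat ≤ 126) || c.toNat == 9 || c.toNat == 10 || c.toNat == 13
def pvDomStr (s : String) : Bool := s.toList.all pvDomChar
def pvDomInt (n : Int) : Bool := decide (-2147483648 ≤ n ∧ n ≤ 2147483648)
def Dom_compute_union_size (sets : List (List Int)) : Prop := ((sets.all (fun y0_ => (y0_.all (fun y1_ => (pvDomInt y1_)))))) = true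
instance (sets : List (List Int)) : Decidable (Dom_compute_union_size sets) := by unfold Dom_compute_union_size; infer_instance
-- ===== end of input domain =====

-- B replaces A's per-mask chains of set intersections by one pass assigning each element of
-- the union its membership bitmask, from which every intersection size is counted (alternative
-- algorithm, same inclusion-exclusion sum).


-- ===== PORT A =====
def compute_union_size (sets : List (List Int)) : Int :=
  let k := sets.length
  if k = 0 then 0
  else
    let masks := PySem.List.pyRange 1 ((2 : Int) ^ k) 1
    let sizes : PySem.Dict Int Nat :=
      masks.foldl (fun d mask =>
        let inter : Option (List Int) :=
          (PySem.List.pyRange 0 (k : Int) 1).foldl (fun inter i =>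
            -- mask & (1 << i) ≠ 0: bit i of mask (mask ≥ 1 and i ≥ 0 here, so .toNat is exact)
            if mask.toNat.testBit i.toNat then
              match inter with
              | none => some (PySem.List.pyGetD sets i [])                    -- sets[i].copy()
              | some cur => some (PySem.Set.inter cur (PySem.List.pyGetD sets i []))  -- intersection & sets[i]
            else inter) none
        -- len(intersection) if intersection else 0  (falsy: None or the empty set)
        d.insert mask (match inter with
          | some cur => if cur ≠ [] then cur.length else 0
          | none => 0)) PySem.Dict.empty
    masks.foldl (fun result mask =>
      let bits := (PySem.Int.toBinChars mask).count '1'                       -- bin(mask).count('1')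
      let sign : Int := if bits % 2 = 1 then 1 else -1
      result + sign * (2 : Int) ^ (sizes.getD mask 0)) 0                      -- sign * (1 << size)

-- ===== PORT B =====
def compute_union_size_alt (sets : List (List Int)) : Int :=
  let k := sets.length
  if k = 0 then 0
  else
    let univ := PySem.Set.ofList sets.flatten           -- set(x for s in sets for x in s)
    -- Python appends bitmasks while iterating the set `univ`; the iteration order is
    -- immaterial because bms is only counted per mask below.
    let bms : List Nat := univ.foldl (fun bms x =>
      let m : Nat := (PySem.List.enumerate sets).foldl (fun m p =>
        if p.2.contains x then m ||| (1 <<< p.1.toNat) else m) 0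
      bms ++ [m]) []
    (PySem.List.pyRange 1 ((2 : Int) ^ k) 1).foldl (fun result mask =>
      let size : Nat := bms.foldl (fun size m =>
        if m &&& mask.toNat = mask.toNat then size + 1 else size) 0          -- m & mask == mask (mask ≥ 1)
      let bits := (PySem.Int.toBinChars mask).count '1'
      let term : Int := (2 : Int) ^ size                                     -- 1 << size
      result + (if bits % 2 = 1 then term else -term)) 0

-- ===== PRECONDITION & SPEC =====
-- The Python parameter is a list of SETS of ints; an inner List Int models a set, so its
-- elements are distinct. Pre_ states exactly this representation invariant (every Python
-- input satisfies it); A returns normally on all such inputs.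
def Pre_compute_union_size (sets : List (List Int)) : Prop := ∀ s ∈ sets, s.Nodup
instance (sets : List (List Int)) : Decidable (Pre_compute_union_size sets) := by
  unfold Pre_compute_union_size; infer_instance

def pvWitness_compute_union_size : List (List Int) := [[1, 2], [2, 3]]

def Spec_compute_union_size (sets : List (List Int)) (out : Int) : Prop := out = compute_union_size_alt sets
instance (sets : List (List Int)) (out : Int) : Decidable (Spec_compute_union_size sets out) := by
  unfold Spec_compute_union_size; infer_instance

-- ===== CLAIM (what is proved, stated in full; the proofs are below) =====
def Claim_equal_compute_union_size : Prop :=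
  ∀ (sets : List (List Int)), Dom_compute_union_size sets → Pre_compute_union_size sets →
    Spec_compute_union_size sets (compute_union_size sets)

-- ===== LEMMAS AND PROOFS =====

-- index access / condition abbreviations (proof-side)
def pvS (sets : List (List Int)) (i : Nat) : List Int := sets.getD i []

def pvG (sets : List (List Int)) (mn : Nat) : Option (List Int) → Nat → Option (List Int) :=
  fun inter j =>
    if mn.testBit j then
      match inter with
      | none => some (pvS sets j)
      | some cur => some (cur.filter (fun x => (pvS sets j).contains x))
    else inter

-- A2: fold from a `some` state filters by the masked sets
theorem pvA_fold_some (sets : List (List Int)) (mn : Nat) (idxs : List Nat) :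
    ∀ L : List Int, L.Nodup →
      ∃ L', idxs.foldl (pvG sets mn) (some L) = some L' ∧ L'.Nodup ∧
        ∀ x, x ∈ L' ↔ x ∈ L ∧ ∀ i ∈ idxs, mn.testBit i → x ∈ pvS sets i := by
  induction idxs with
  | nil => exact fun L hL => ⟨L, rfl, hL, by simp⟩
  | cons j idxs ih =>
    intro L hL
    by_cases hj : mn.testBit j
    · obtain ⟨L', h1, h2, h3⟩ := ih (L.filter (fun x => (pvS sets j).contains x)) (hL.filter _)
      refine ⟨L', by rw [List.foldl_cons]; simpa [pvG, hj] using h1, h2, fun x => ?_⟩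
      rw [h3 x]
      simp only [List.mem_filter, List.contains_iff_mem, List.mem_cons]
      constructor
      · rintro ⟨⟨hxL, hxj⟩, hrest⟩
        refine ⟨hxL, fun i hi hbit => ?_⟩
        rcases hi with rfl | hi
        · simpa using hxj
        · exact hrest i hi hbit
      · rintro ⟨hxL, hall⟩
        exact ⟨⟨hxL, by simpa using hall j (by simp) hj⟩, fun i hi hbit => hall i (by simp [hi]) hbit⟩
    · obtain ⟨L', h1, h2, h3⟩ := ih L hL
      refine ⟨L', by rw [List.foldl_cons]; simpa [pvG, hj] using h1, h2, fun x => ?_⟩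
      rw [h3 x]
      constructor
      · rintro ⟨hxL, hrest⟩
        refine ⟨hxL, fun i hi hbit => ?_⟩
        rcases List.mem_cons.mp hi with rfl | hi
        · exact absurd hbit hj
        · exact hrest i hi hbit
      · rintro ⟨hxL, hall⟩
        exact ⟨hxL, fun i hi hbit => hall i (List.mem_cons_of_mem _ hi) hbit⟩

-- A3: fold from `none`: either no masked index was seen (still none), or the result is the
-- intersection of the masked sets, computed from the first masked one
theorem pvA_fold_none (sets : List (List Int)) (mn : Nat) (hpre : ∀ s ∈ sets, s.Nodup)
    (idxs : List Nat) :
    (idxs.foldl (pvG sets mn) none = none ∧ ∀ i ∈ idxs, ¬ mn.testBit i) ∨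
    (∃ L', idxs.foldl (pvG sets mn) none = some L' ∧ L'.Nodup ∧
      ∀ x, x ∈ L' ↔ (∀ i ∈ idxs, mn.testBit i → x ∈ pvS sets i) ∧ ∃ i ∈ idxs, mn.testBit i) := by
  have hSnodup : ∀ j, (pvS sets j).Nodup := by
    intro j
    by_cases hj : j < sets.length
    · have : sets.getD j [] ∈ sets := by
        rw [List.getD_eq_getElem sets [] hj]; exact List.getElem_mem hj
      exact hpre _ this
    · simp [pvS, Nat.le_of_not_lt hj]
  induction idxs with
  | nil => exact Or.inl ⟨rfl, by simp⟩
  | cons j idxs ih =>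
    by_cases hj : mn.testBit j
    · right
      obtain ⟨L', h1, h2, h3⟩ := pvA_fold_some sets mn idxs (pvS sets j) (hSnodup j)
      refine ⟨L', by rw [List.foldl_cons]; simpa [pvG, hj] using h1, h2, fun x => ?_⟩
      rw [h3 x]
      constructor
      · rintro ⟨hxj, hrest⟩
        refine ⟨fun i hi hbit => ?_, ⟨j, by simp, hj⟩⟩
        rcases List.mem_cons.mp hi with rfl | hi
        · exact hxj
        · exact hrest i hi hbit
      · rintro ⟨hall, -⟩
        exact ⟨hall j (by simp) hj, fun i hi hbit => hall i (List.mem_cons_of_mem _ hi) hbit⟩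
    · have hstep : (j :: idxs).foldl (pvG sets mn) none = idxs.foldl (pvG sets mn) none := by
        rw [List.foldl_cons]; simp [pvG, hj]
      rcases ih with ⟨h1, h2⟩ | ⟨L', h1, h2, h3⟩
      · left
        refine ⟨by rw [hstep]; exact h1, fun i hi => ?_⟩
        rcases List.mem_cons.mp hi with rfl | hi
        · exact hj
        · exact h2 i hi
      · right
        refine ⟨L', by rw [hstep]; exact h1, h2, fun x => ?_⟩
        rw [h3 x]
        constructor
        · rintro ⟨hall, i, hi, hbit⟩
          exact ⟨fun i' hi' hbit' => by
            rcases List.mem_cons.mp hi' with rfl | hi'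
            · exact absurd hbit' hj
            · exact hall i' hi' hbit', ⟨i, List.mem_cons_of_mem _ hi, hbit⟩⟩
        · rintro ⟨hall, i, hi, hbit⟩
          rcases List.mem_cons.mp hi with rfl | hi
          · exact absurd hbit hj
          · exact ⟨fun i' hi' hbit' => hall i' (List.mem_cons_of_mem _ hi') hbit', ⟨i, hi, hbit⟩⟩

-- the append-accumulator loop is a map
theorem pv_foldl_append_map {α β : Type} (f : α → β) (l : List α) (acc : List β) :
    l.foldl (fun bms x => bms ++ [f x]) acc = acc ++ l.map f := by
  induction l generalizing acc with
  | nil => simp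
  | cons x l ih => simp [ih]

-- the counting loop is the length of the filtered list
theorem pv_foldl_count {α : Type} (P : α → Prop) [DecidablePred P] (l : List α) (n : Nat) :
    l.foldl (fun size m => if P m then size + 1 else size) n
      = n + (l.filter (fun m => decide (P m))).length := by
  induction l generalizing n with
  | nil => simp
  | cons x l ih =>
    by_cases hx : P x
    · simp [hx, ih]; omega
    · simp [hx, ih]


theorem pv_testBit_one (j : Nat) : Nat.testBit 1 j = decide (j = 0) := by
  rcases Nat.eq_zero_or_pos j with h | h
  · simp [h]
  · rw [Nat.testBit_eq_false_of_lt, decide_eq_false (by omega)]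
    calc 1 < 2 ^ 1 := by norm_num
      _ ≤ 2 ^ j := Nat.pow_le_pow_right (by norm_num) h

theorem pv_testBit_or_shift (m0 n j : Nat) :
    (m0 ||| 1 <<< n).testBit j = true ↔ (m0.testBit j = true ∨ j = n) := by
  rw [Nat.testBit_or, Nat.testBit_shiftLeft, pv_testBit_one]
  rcases Nat.lt_or_ge j n with h | h
  · have hne : j ≠ n := by omega
    have hge : ¬ (j ≥ n) := by omega
    simp [hge, hne]
  · simp only [Bool.or_eq_true, Bool.and_eq_true, decide_eq_true_eq]
    constructor
    · rintro (h1 | ⟨-, h2⟩)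
      · exact Or.inl h1
      · right; omega
    · rintro (h1 | h1)
      · exact Or.inl h1
      · exact Or.inr ⟨by omega, by omega⟩

theorem pv_bm_spec (x : Int) (ss : List (List Int)) :
    ∀ (st : Int), 0 ≤ st → ∀ (m0 : Nat) (j : Nat),
    (((PySem.List.enumerate ss st).foldl (fun m p =>
        if p.2.contains x then m ||| (1 <<< p.1.toNat) else m) m0).testBit j = true
      ↔ (m0.testBit j = true ∨ ∃ i, i < ss.length ∧ j = st.toNat + i ∧ x ∈ ss.getD i [])) := by
  induction ss with
  | nil => simp [PySem.List.enumerate_nil]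
  | cons s ss ih =>
    intro st hst m0 j
    rw [PySem.List.enumerate_cons, List.foldl_cons]
    have hto : (st + 1).toNat = st.toNat + 1 := by omega
    by_cases hm : s.contains x
    · have hx : x ∈ s := by simpa [List.contains_iff_mem] using hm
      simp only [hm, if_true]
      rw [ih (st + 1) (by omega), pv_testBit_or_shift, hto]
      constructor
      · rintro ((h1 | h1) | ⟨i, hi, hji, hxi⟩)
        · exact Or.inl h1
        · exact Or.inr ⟨0, by simp, by omega, by simpa using hx⟩
        · exact Or.inr ⟨i + 1, by simpa using hi, by omega, by simpa using hxi⟩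
      · rintro (h1 | ⟨i, hi, hji, hxi⟩)
        · exact Or.inl (Or.inl h1)
        · match i with
          | 0 => exact Or.inl (Or.inr (by omega))
          | i + 1 => exact Or.inr ⟨i, by simp at hi; omega, by omega, by simpa using hxi⟩
    · have hx : x ∉ s := by simpa [List.contains_iff_mem] using hm
      rw [if_neg (by simpa [List.contains_iff_mem] using hx)]
      rw [ih (st + 1) (by omega), hto]
      constructor
      · rintro (h1 | ⟨i, hi, hji, hxi⟩)
        · exact Or.inl h1
        · exact Or.inr ⟨i + 1, by simpa using hi, by omega, by simpa using hxi⟩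
      · rintro (h1 | ⟨i, hi, hji, hxi⟩)
        · exact Or.inl h1
        · match i with
          | 0 => exact absurd (by simpa using hxi) hx
          | i + 1 => exact Or.inr ⟨i, by simp at hi; omega, by omega, by simpa using hxi⟩

-- m & mn = mn  iff  every bit of mn is a bit of m
theorem pv_land_iff (m mn : Nat) : (m &&& mn = mn) ↔ ∀ j, mn.testBit j = true → m.testBit j = true := by
  constructor
  · intro h j hj
    have := congrArg (fun t => Nat.testBit t j) h
    simp only [Nat.testBit_land] at this
    rw [hj, Bool.and_true] at this
    exact this
  · intro h
    apply Nat.eq_of_testBit_eq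
    intro j
    rw [Nat.testBit_land]
    by_cases hj : mn.testBit j
    · simp [hj, h j hj]
    · simp [hj]

-- two duplicate-free lists with the same members have the same length
theorem pv_nodup_len (l1 l2 : List Int) (h1 : l1.Nodup) (h2 : l2.Nodup)
    (h : ∀ x, x ∈ l1 ↔ x ∈ l2) : l1.length = l2.length := by
  rw [← List.toFinset_card_of_nodup h1, ← List.toFinset_card_of_nodup h2]
  congr 1
  ext x
  simp [h x]

-- looking up the insert-per-key loop
theorem pv_dict_fold_getD (f : Int → Nat) (ms : List Int) :
    ∀ (d : PySem.Dict Int Nat) (x : Int) (d0 : Nat),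
    (ms.foldl (fun d m => d.insert m (f m)) d).getD x d0
      = if x ∈ ms then f x else d.getD x d0 := by
  induction ms with
  | nil => simp
  | cons m ms ih =>
    intro d x d0
    rw [List.foldl_cons, ih]
    by_cases hx : x ∈ ms
    · simp [hx]
    · simp only [hx, if_false, List.mem_cons]
      rw [PySem.Dict.getD_insert]
      by_cases hxm : x = m <;> simp [hxm]

theorem pv_size_eq (sets : List (List Int)) (hpre : ∀ s ∈ sets, s.Nodup)
    (mask : Int) (h1 : 1 ≤ mask) (h2 : mask < (2 : Int) ^ sets.length) :
    (match (PySem.List.pyRange 0 (sets.length : Int) 1).foldl (fun inter i =>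
        if mask.toNat.testBit i.toNat then
          match inter with
          | none => some (PySem.List.pyGetD sets i [])
          | some cur => some (PySem.Set.inter cur (PySem.List.pyGetD sets i []))
        else inter) none with
      | some cur => if cur ≠ [] then cur.length else 0
      | none => 0)
    = ((PySem.Set.ofList sets.flatten).foldl (fun bms x =>
         bms ++ [(PySem.List.enumerate sets).foldl (fun m p =>
           if p.2.contains x then m ||| (1 <<< p.1.toNat) else m) 0]) []).foldl
        (fun size m => if m &&& mask.toNat = mask.toNat then size + 1 else size) 0 := by
  set k := sets.length with hk
  set mn := mask.toNat with hmn
  have hcast : ((2 ^ k : Nat) : Int) = (2 : Int) ^ k := by push_cast; ring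
  have hmn1 : 1 ≤ mn := by omega
  have hmn2 : mn < 2 ^ k := by omega
  have hbits : ∀ i, mn.testBit i = true → i < k := by
    intro i hi
    by_contra hik
    have hlt : mn < 2 ^ i :=
      lt_of_lt_of_le hmn2 (Nat.pow_le_pow_right (by norm_num) (by omega))
    rw [Nat.testBit_eq_false_of_lt hlt] at hi
    exact Bool.false_ne_true hi
  have hex : ∃ i, mn.testBit i = true ∧ i < k := by
    have h0 : ∃ i, mn.testBit i = true := by
      by_contra h
      rw [not_exists] at h
      have : mn = 0 := Nat.eq_of_testBit_eq (fun i => by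
        simp [Bool.eq_false_iff.mpr (h i)])
      omega
    obtain ⟨i, hi⟩ := h0
    exact ⟨i, hi, hbits i hi⟩
  -- A side: convert the pyRange fold to a List.range fold of pvG
  have hr : PySem.List.pyRange 0 (k : Int) 1 = (List.range k).map (fun j => ((j : Nat) : Int)) := by
    rw [PySem.List.pyRange_one]
    simp
  rw [hr, List.foldl_map]
  have hfg : ∀ (inter : Option (List Int)), ∀ j ∈ List.range k,
      (if mn.testBit ((j : Int)).toNat then
        match inter with
        | none => some (PySem.List.pyGetD sets ((j : Nat) : Int) [])
        | some cur => some (PySem.Set.inter cur (PySem.List.pyGetD sets ((j : Nat) : Int) []))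
       else inter) = pvG sets mn inter j := by
    intro inter j _
    simp only [Int.toNat_natCast, PySem.List.pyGetD_natCast, pvG, pvS, PySem.Set.inter]
    rfl
  rw [PySem.List.foldl_congr_mem _ _ _ _ hfg]
  -- B side: bms is a map, the count is a filter length
  rw [pv_foldl_append_map, List.nil_append,
      pv_foldl_count (fun m => m &&& mn = mn), Nat.zero_add,
      ← List.countP_eq_length_filter, List.countP_map, List.countP_eq_length_filter]
  -- characterize both lists and compare lengths
  rcases pvA_fold_none sets mn hpre (List.range k) with ⟨-, hnone⟩ | ⟨L', hres, hnd, hmem⟩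
  · obtain ⟨i, hi, hik⟩ := hex
    exact absurd hi (by simpa using hnone i (List.mem_range.mpr hik))
  · rw [hres]
    have hcollapse : (if L' ≠ [] then L'.length else 0) = L'.length := by
      rcases L' with - | ⟨y, L'⟩ <;> simp
    show (if L' ≠ [] then L'.length else 0) = _
    rw [hcollapse]
    apply pv_nodup_len _ _ hnd ((PySem.Set.nodup_ofList _).filter _)
    intro x
    rw [hmem x, List.mem_filter]
    simp only [Function.comp_apply]
    have hbm : ∀ j, ((PySem.List.enumerate sets).foldl (fun (m : Nat) (p : Int × List Int) =>
        if p.2.contains x then m ||| (1 <<< p.1.toNat) else m) 0).testBit j = true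
        ↔ (j < k ∧ x ∈ pvS sets j) := by
      intro j
      rw [pv_bm_spec x sets 0 le_rfl 0 j]
      simp only [Nat.zero_testBit, Bool.false_eq_true, false_or]
      constructor
      · rintro ⟨i, hik, hji, hxi⟩
        have : j = i := by omega
        exact ⟨this ▸ hik, by simpa [pvS, this] using hxi⟩
      · rintro ⟨hjk, hxj⟩
        exact ⟨j, hjk, by omega, hxj⟩
    constructor
    · rintro ⟨hall, -⟩
      have hP : ∀ i, mn.testBit i = true → x ∈ pvS sets i := fun i hi =>
        hall i (List.mem_range.mpr (hbits i hi)) hi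
      obtain ⟨i0, hi0, hi0k⟩ := hex
      refine ⟨?_, ?_⟩
      · rw [PySem.Set.mem_ofList, List.mem_flatten]
        refine ⟨sets.getD i0 [], ?_, hP i0 hi0⟩
        rw [List.getD_eq_getElem sets [] hi0k]
        exact List.getElem_mem hi0k
      · rw [decide_eq_true_eq, pv_land_iff]
        intro j hj
        rw [hbm j]
        exact ⟨hbits j hj, hP j hj⟩
    · rintro ⟨-, hq⟩
      rw [decide_eq_true_eq, pv_land_iff] at hq
      refine ⟨fun i _ hi => ((hbm i).mp (hq i hi)).2, ?_⟩
      obtain ⟨i0, hi0, hi0k⟩ := hex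
      exact ⟨i0, List.mem_range.mpr hi0k, hi0⟩

-- ===== VERDICT (by name: the statement is the Claim_ definition above) =====
theorem compute_union_size_spec : Claim_equal_compute_union_size := by
  intro sets _ hpre
  show compute_union_size sets = compute_union_size_alt sets
  by_cases hk : sets.length = 0
  · cases sets with
    | nil => rfl
    | cons s ss => simp at hk
  · simp only [compute_union_size, compute_union_size_alt]
    rw [if_neg hk, if_neg hk]
    apply PySem.List.foldl_congr_mem
    intro acc mask hmask
    have hm := PySem.List.mem_pyRange_one.mp hmask
    rw [pv_dict_fold_getD, if_pos hmask, pv_size_eq sets hpre mask hm.1 hm.2]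
    split_ifs with hb
    · ring
    · ring
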